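-- pv_equiv track=rewrite | github.com/kcleong/aivd_2024 | assignment_18/brute_force/main.py | batched_permutations
-- ===== SOURCE A (Python) =====
-- import itertools
--
-- def batched_permutations(horiz_candidates, batch_size):
--     """Generator that yields batches of permutations."""
--     horiz_permutations = itertools.product(*horiz_candidates)
--     batch = []
--
--     for perm in horiz_permutations:
--         batch.append(perm)
--         if len(batch) >= batch_size:
--             yield batch
--             batch = []
--
--     # Yield any remaining permutations
--     if batch:
--         yield batch
-- ===== SOURCE B (Python) =====
-- import itertools
--
-- def batched_permutations(horiz_candidates, batch_size):
--     """Generator that yields batches of permutations (islice chunking)."""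
--     it = itertools.product(*horiz_candidates)
--     while True:
--         batch = list(itertools.islice(it, batch_size))
--         if not batch:
--             return
--         yield batch
-- ===== Notes on version B (the rewrite author's own statement) =====
-- stated objective: idiomatic
-- what changed: Replaces the manual append/len/reset accumulator loop with the standard islice-chunking idiom that pulls whole batches off the product iterator and keeps no running state between yields.
-- outside the precondition, e.g. on batched_permutations([[1], [2]], 0): A returns [[(1, 2)]], B returns []; on batched_permutations([[1]], -1): A returns [[(1,)]], B raises ValueError
import Mathlib
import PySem

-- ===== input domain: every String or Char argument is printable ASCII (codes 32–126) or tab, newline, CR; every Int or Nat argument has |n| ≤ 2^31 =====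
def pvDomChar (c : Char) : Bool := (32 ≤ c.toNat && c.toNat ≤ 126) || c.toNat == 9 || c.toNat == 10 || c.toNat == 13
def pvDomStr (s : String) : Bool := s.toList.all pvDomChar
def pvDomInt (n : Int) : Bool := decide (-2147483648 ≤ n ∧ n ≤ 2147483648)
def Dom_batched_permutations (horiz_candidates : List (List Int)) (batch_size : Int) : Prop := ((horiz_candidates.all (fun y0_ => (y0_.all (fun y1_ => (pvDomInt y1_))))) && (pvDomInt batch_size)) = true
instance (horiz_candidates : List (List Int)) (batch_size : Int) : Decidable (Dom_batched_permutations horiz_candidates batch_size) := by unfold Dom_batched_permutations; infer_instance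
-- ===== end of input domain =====

-- B replaces A's manual append/len/reset accumulator loop with the idiomatic islice-chunking loop over the same product iterator; return-sequence equivalence proved for batch_size ≥ 1.


-- ===== PORT A =====
-- itertools.product(*lists): rightmost factor varies fastest (shared by both ports)
def pyProduct : List (List Int) → List (List Int)
  | [] => [[]]
  | l :: ls => l.flatMap (fun x => (pyProduct ls).map (fun t => x :: t))

-- one iteration of A's for-loop body: append perm, flush when len(batch) >= batch_size
def stepA (batch_size : Int) (s : List (List (List Int)) × List (List Int))
    (perm : List Int) : List (List (List Int)) × List (List Int) :=
  let batch := s.2 ++ [perm]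
  if batch_size ≤ (batch.length : Int) then (s.1 ++ [batch], []) else (s.1, batch)

def batched_permutations (horiz_candidates : List (List Int)) (batch_size : Int) : List (List (List Int)) :=
  let r := (pyProduct horiz_candidates).foldl (stepA batch_size) ([], [])
  if r.2 ≠ [] then r.1 ++ [r.2] else r.1

-- ===== PORT B =====
-- the while-True islice loop: grab `b` items, stop on an empty batch
def chunksB (b : Nat) : List (List Int) → List (List (List Int))
  | [] => []
  | x :: xs =>
    if b = 0 then []
    else (x :: xs).take b :: chunksB b ((x :: xs).drop b)
termination_by xs => xs.length
decreasing_by simp; omega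

def batched_permutations_alt (horiz_candidates : List (List Int)) (batch_size : Int) : List (List (List Int)) :=
  chunksB batch_size.toNat (pyProduct horiz_candidates)

-- ===== PRECONDITION & SPEC =====
-- Pre_ excludes batch_size ≤ 0, where B's islice raises ValueError (negative) or stops at once
-- (zero), while A's accumulator loop happens to emit singleton batches.
def Pre_batched_permutations (horiz_candidates : List (List Int)) (batch_size : Int) : Prop :=
  1 ≤ batch_size
instance (horiz_candidates : List (List Int)) (batch_size : Int) : Decidable (Pre_batched_permutations horiz_candidates batch_size) := by unfold Pre_batched_permutations; infer_instance
def pvWitness_batched_permutations : List (List Int) × Int := ([[1, 2], [3]], 2)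
def Spec_batched_permutations (horiz_candidates : List (List Int)) (batch_size : Int) (out : List (List (List Int))) : Prop := out = batched_permutations_alt horiz_candidates batch_size
instance (horiz_candidates : List (List Int)) (batch_size : Int) (out : List (List (List Int))) : Decidable (Spec_batched_permutations horiz_candidates batch_size out) := by unfold Spec_batched_permutations; infer_instance

-- ===== CLAIM (what is proved, stated in full; the proofs are below) =====
def Claim_equal_batched_permutations : Prop := ∀ (horiz_candidates : List (List Int)) (batch_size : Int), Dom_batched_permutations horiz_candidates batch_size → Pre_batched_permutations horiz_candidates batch_size → Spec_batched_permutations horiz_candidates batch_size (batched_permutations horiz_candidates batch_size)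

-- ===== LEMMAS AND PROOFS =====

-- A's fold, finished off with the trailing-batch flush, produces exactly the islice chunks of
-- the pending batch followed by the remaining permutations.
lemma foldA_eq_chunks (b : Nat) (hb : 1 ≤ b) (perms : List (List Int)) :
    ∀ (acc : List (List (List Int))) (batch : List (List Int)), batch.length < b →
    (let r := perms.foldl (stepA (b : Int)) (acc, batch);
     if r.2 ≠ [] then r.1 ++ [r.2] else r.1) = acc ++ chunksB b (batch ++ perms) := by
  induction perms with
  | nil =>
    intro acc batch hlen
    cases batch with
    | nil => simp [chunksB]
    | cons x t =>
      simp only [List.foldl_nil, List.append_nil]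
      rw [chunksB]
      simp only [if_neg (by omega : ¬ b = 0)]
      have htake : (x :: t).take b = x :: t := List.take_of_length_le (by simpa using hlen.le)
      have hdrop : (x :: t).drop b = [] := List.drop_eq_nil_of_le (by simpa using hlen.le)
      simp [htake, hdrop, chunksB]
  | cons p rest ih =>
    intro acc batch hlen
    simp only [List.foldl_cons]
    by_cases hfull : (b : Int) ≤ ((batch ++ [p]).length : Int)
    · simp only [List.length_append, List.length_cons, List.length_nil] at hfull
      have hlenb : (batch ++ [p]).length = b := by simp; omega
      have hstep : stepA (b : Int) (acc, batch) p = (acc ++ [batch ++ [p]], []) := by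
        simp only [stepA]
        rw [if_pos (by simpa using hfull)]
      rw [hstep, ih (acc ++ [batch ++ [p]]) [] (by simp; omega)]
      have hsh : batch ++ p :: rest = (batch ++ [p]) ++ rest := by simp
      have htake : List.take b (batch ++ p :: rest) = batch ++ [p] := by
        rw [hsh, ← hlenb, List.take_left]
      have hdrop : List.drop b (batch ++ p :: rest) = rest := by
        rw [hsh, ← hlenb, List.drop_left]
      cases h' : batch ++ p :: rest with
      | nil => simp at h'
      | cons y ys =>
        rw [chunksB]
        simp only [if_neg (by omega : ¬ b = 0)]
        rw [← h', htake, hdrop]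
        simp
    · simp only [List.length_append, List.length_cons, List.length_nil] at hfull
      have hstep : stepA (b : Int) (acc, batch) p = (acc, batch ++ [p]) := by
        simp only [stepA]
        rw [if_neg (by simpa using hfull)]
      rw [hstep, ih acc (batch ++ [p]) (by simp; omega)]
      simp

-- ===== VERDICT (by name: the statement is the Claim_ definition above) =====
theorem batched_permutations_spec : Claim_equal_batched_permutations := by
  intro hc bs _ hpre
  unfold Pre_batched_permutations at hpre
  unfold Spec_batched_permutations batched_permutations batched_permutations_alt
  have hb : 1 ≤ bs.toNat := by omega
  have hcast : (bs.toNat : Int) = bs := by omega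
  have := foldA_eq_chunks bs.toNat hb (pyProduct hc) [] [] (by simp; omega)
  rw [hcast] at this
  simpa using this
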